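-- pv_equiv track=rewrite | github.com/duynguyen2001/ecole-june-demo | parser/server_utils.py | get_last_user_input
-- ===== SOURCE A (Python) =====
-- def get_last_user_input(conversations, skip =0):
--     """
--     Get the last user input from the conversation.
--     For example, given the conversation:
--     [
--         {"role": "user", "prompt": "Hi"},
--         {"role": "bot", "prompt": "Hello"},
--         {"role": "user", "prompt": "How are you?"}
--     ]
--     return "How are you?"
--     """
--     skipped = 0
--     for conv in reversed(conversations):
--         if conv["role"] == "user":
--             if skipped == skip:
--                 return conv
--             skipped += 1
--     return None
-- ===== SOURCE B (Python) =====
-- def get_last_user_input(conversations, skip=0):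
--     users = [c for c in conversations if c["role"] == "user"]
--     idx = len(users) - 1 - skip
--     return users[idx] if 0 <= idx < len(users) else None
-- ===== Notes on version B (the rewrite author's own statement) =====
-- stated objective: simpler
-- what changed: Replaces the reversed early-exit scan with a skip counter by filtering the user messages once and indexing the filtered list from the end with a bounds check.
-- outside the precondition, e.g. on get_last_user_input([{'x': 'y'}, {'role': 'user'}], 0): A returns {'role': 'user'}, B raises KeyError
import Mathlib
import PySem

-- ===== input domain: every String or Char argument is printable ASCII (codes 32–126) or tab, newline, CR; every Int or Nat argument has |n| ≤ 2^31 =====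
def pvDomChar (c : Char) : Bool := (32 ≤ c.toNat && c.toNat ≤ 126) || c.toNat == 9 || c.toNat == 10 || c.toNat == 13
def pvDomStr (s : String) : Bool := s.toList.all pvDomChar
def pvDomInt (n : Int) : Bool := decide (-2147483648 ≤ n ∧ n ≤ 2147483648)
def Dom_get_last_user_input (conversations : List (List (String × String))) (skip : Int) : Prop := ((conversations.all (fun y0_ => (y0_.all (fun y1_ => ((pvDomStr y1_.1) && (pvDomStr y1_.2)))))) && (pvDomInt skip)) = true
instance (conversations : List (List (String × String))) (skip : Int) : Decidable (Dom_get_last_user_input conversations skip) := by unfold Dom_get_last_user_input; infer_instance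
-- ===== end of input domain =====

-- B replaces A's reversed early-exit scan with a skip counter by a one-shot filter of the
-- user messages plus a bounds-checked index from the end (objective: simpler).

-- ===== PORT A =====
-- conv["role"] == "user" as both Pythons test it (KeyError inputs are excluded by Pre_).
def pvIsUser (c : List (String × String)) : Bool := c.lookup "role" == some "user"

-- the 'for conv in reversed(conversations)' loop with the 'skipped' counter
def pvScanA (skip : Int) : List (List (String × String)) → Int → Option (List (String × String))
  | [], _ => none
  | c :: rest, skipped =>
    if pvIsUser c then
      if skipped = skip then some c else pvScanA skip rest (skipped + 1)
    else pvScanA skip rest skipped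

def get_last_user_input (conversations : List (List (String × String))) (skip : Int) : Option (List (String × String)) :=
  pvScanA skip conversations.reverse 0

-- ===== PORT B =====
def get_last_user_input_alt (conversations : List (List (String × String))) (skip : Int) : Option (List (String × String)) :=
  let users := conversations.filter pvIsUser
  let idx : Int := (users.length : Int) - 1 - skip
  if 0 ≤ idx ∧ idx < (users.length : Int) then PySem.List.pyGet? users idx else none

-- ===== PRECONDITION & SPEC =====
-- Pre_ excludes inputs containing a message dict without a "role" key: on those both Pythons
-- can raise KeyError (A returns only when it finds the answer before reaching such a dict).
def Pre_get_last_user_input (conversations : List (List (String × String))) (skip : Int) : Prop :=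
  ∀ c ∈ conversations, (c.lookup "role").isSome
instance (conversations : List (List (String × String))) (skip : Int) : Decidable (Pre_get_last_user_input conversations skip) := by unfold Pre_get_last_user_input; infer_instance

def pvWitness_get_last_user_input : (List (List (String × String))) × Int :=
  ([[("role", "user"), ("prompt", "Hi")], [("role", "bot"), ("prompt", "Hello")]], 0)

def Spec_get_last_user_input (conversations : List (List (String × String))) (skip : Int) (out : Option (List (String × String))) : Prop := out = get_last_user_input_alt conversations skip
instance (conversations : List (List (String × String))) (skip : Int) (out : Option (List (String × String))) : Decidable (Spec_get_last_user_input conversations skip out) := by unfold Spec_get_last_user_input; infer_instance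

-- ===== CLAIM (what is proved, stated in full; the proofs are below) =====
def Claim_equal_get_last_user_input : Prop := ∀ (conversations : List (List (String × String))) (skip : Int), Dom_get_last_user_input conversations skip → Pre_get_last_user_input conversations skip → Spec_get_last_user_input conversations skip (get_last_user_input conversations skip)

-- ===== LEMMAS AND PROOFS =====

-- A's reversed scan starting at counter s returns the (skip - s)-th user message of the scanned list.
theorem pvScanA_eq (skip : Int) (l : List (List (String × String))) (s : Int) :
    pvScanA skip l s =
      if 0 ≤ skip - s then (l.filter pvIsUser)[(skip - s).toNat]? else none := by
  induction l generalizing s with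
  | nil => simp [pvScanA]
  | cons c rest ih =>
    by_cases hc : pvIsUser c
    · by_cases hs : s = skip
      · subst hs
        simp [pvScanA, hc]
      · rw [pvScanA, if_pos hc, if_neg hs, ih (s + 1)]
        by_cases hle : 0 ≤ skip - s
        · have hpos : 0 < skip - s := by omega
          rw [if_pos (by omega : (0:Int) ≤ skip - (s + 1)), if_pos hle]
          have : (skip - s).toNat = (skip - (s + 1)).toNat + 1 := by omega
          simp [hc, this]
        · rw [if_neg (by omega : ¬ (0:Int) ≤ skip - (s + 1)), if_neg hle]
    · rw [pvScanA, if_neg hc, ih s]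
      simp [hc]

-- ===== VERDICT (by name: the statement is the Claim_ definition above) =====

theorem get_last_user_input_spec : Claim_equal_get_last_user_input := by
  intro conversations skip _ _
  unfold Spec_get_last_user_input get_last_user_input get_last_user_input_alt
  rw [pvScanA_eq]
  simp only [List.filter_reverse]
  set users := conversations.filter pvIsUser with husers
  by_cases hle : 0 ≤ skip - 0
  · rw [if_pos hle]
    by_cases hlt : (skip - 0).toNat < users.length
    · rw [List.getElem?_reverse (by simpa using hlt)]
      rw [if_pos (by omega)]
      have h0 : ((users.length : Int) - 1 - skip) = ((users.length - 1 - (skip - 0).toNat : ℕ) : Int) := by omega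
      rw [h0, PySem.List.pyGet?_natCast]
    · have hnone : users.reverse[(skip - 0).toNat]? = none := by
        simp only [List.getElem?_eq_none_iff, List.length_reverse]
        omega
      rw [hnone, if_neg (by omega)]
  · rw [if_neg hle, if_neg (by omega)]
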